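-- pv_equiv track=rewrite | github.com/Janldeboer/ReDeploy | app.py | retrieve_file_changes
-- ===== SOURCE A (Python) =====
-- def retrieve_file_changes(answer):
--     changes = {}
--     lines = answer.split('\n')
--     file_path = None
--     content = []
--     in_code_block = False
--
--     for line in lines:
--         if line.startswith('```') and not in_code_block:
--             in_code_block = True
--             file_path = line[3:].strip()
--             content = []
--         elif line.startswith('```') and in_code_block:
--             in_code_block = False
--             changes[file_path] = '\n'.join(content)
--         elif in_code_block:
--             content.append(line)
--
--     return changes
-- ===== SOURCE B (Python) =====
-- def retrieve_file_changes(answer):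
--     lines = answer.split('\n')
--     fences = [i for i, line in enumerate(lines) if line.startswith('```')]
--     changes = {}
--     it = iter(fences)
--     for opening, closing in zip(it, it):
--         changes[lines[opening][3:].strip()] = '\n'.join(lines[opening + 1:closing])
--     return changes
-- ===== Notes on version B (the rewrite author's own statement) =====
-- stated objective: alternative
-- what changed: Replaces A's single toggling state machine (in_code_block flag with carried file_path/content) by a staged index-then-pair decomposition: first pass collects the indices of all ``` fence lines, second pass walks those indices two at a time and slices each block's label and body directly out of the line list.
import Mathlib
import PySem

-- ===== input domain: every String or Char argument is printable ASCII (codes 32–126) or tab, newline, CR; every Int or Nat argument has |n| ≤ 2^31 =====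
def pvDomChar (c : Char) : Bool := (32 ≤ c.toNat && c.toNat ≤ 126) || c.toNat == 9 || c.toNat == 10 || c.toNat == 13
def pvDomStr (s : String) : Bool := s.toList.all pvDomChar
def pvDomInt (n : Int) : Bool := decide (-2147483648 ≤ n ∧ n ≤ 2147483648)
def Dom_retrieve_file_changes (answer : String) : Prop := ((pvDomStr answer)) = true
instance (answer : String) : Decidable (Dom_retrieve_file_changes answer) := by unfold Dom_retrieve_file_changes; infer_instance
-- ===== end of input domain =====

-- B replaces A's toggling state machine by a staged decomposition: collect the indices of all
-- ``` fence lines, then pair them up and slice each block out of the line list; same return value.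

-- ===== PORT A =====
-- state = (changes, file_path, content, in_code_block); Python's initial file_path is None,
-- ported as "" — it is read only after an opening fence has set it, so the initial value is never used.
def pvStepA (st : PySem.Dict String String × String × List String × Bool) (line : String) :
    PySem.Dict String String × String × List String × Bool :=
  let (changes, file_path, content, in_code_block) := st
  if PySem.Str.startswith line "```" && !in_code_block then
    (changes, PySem.Str.strip (PySem.Str.slice line (some 3) none), [], true)
  else if PySem.Str.startswith line "```" && in_code_block then
    (changes.insert file_path (PySem.Str.join "\n" content), file_path, content, false)
  else if in_code_block then
    (changes, file_path, content ++ [line], true)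
  else
    (changes, file_path, content, in_code_block)

def retrieve_file_changes (answer : String) : List (String × String) :=
  (((PySem.Str.split? answer "\n").getD []).foldl pvStepA (PySem.Dict.empty, "", [], false)).1.items

-- ===== PORT B =====
-- fences = [i for i, line in enumerate(lines) if line.startswith('```')]
def pvFences (lines : List String) : List Int :=
  ((PySem.List.enumerate lines 0).filter (fun p => PySem.Str.startswith p.2 "```")).map (fun p => p.1)

-- for opening, closing in zip(it, it): consume the fence indices two at a time
def pvPairLoop (lines : List String) :
    List Int → PySem.Dict String String → PySem.Dict String String
  | o :: c :: rest, changes =>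
      pvPairLoop lines rest
        (changes.insert
          (PySem.Str.strip (PySem.Str.slice (PySem.List.pyGetD lines o "") (some 3) none))
          (PySem.Str.join "\n" (PySem.List.slice lines (some (o + 1)) (some c))))
  | _, changes => changes

def retrieve_file_changes_alt (answer : String) : List (String × String) :=
  let lines := (PySem.Str.split? answer "\n").getD []
  (pvPairLoop lines (pvFences lines) PySem.Dict.empty).items

-- ===== PRECONDITION & SPEC =====
def Spec_retrieve_file_changes (answer : String) (out : List (String × String)) : Prop := out = retrieve_file_changes_alt answer
instance (answer : String) (out : List (String × String)) : Decidable (Spec_retrieve_file_changes answer out) := by unfold Spec_retrieve_file_changes; infer_instance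

-- ===== CLAIM (what is proved, stated in full; the proofs are below) =====
def Claim_equal_retrieve_file_changes : Prop := ∀ (answer : String), Dom_retrieve_file_changes answer → Spec_retrieve_file_changes answer (retrieve_file_changes answer)

-- ===== LEMMAS AND PROOFS =====

-- proof-only intermediate: A's state machine as a pair of structural scans
mutual
def pvOuterI : List String → PySem.Dict String String → PySem.Dict String String
  | [], changes => changes
  | line :: rest, changes =>
    if PySem.Str.startswith line "```" then
      pvInnerI (PySem.Str.strip (PySem.Str.slice line (some 3) none)) [] rest changes
    else
      pvOuterI rest changes

def pvInnerI (path : String) (body : List String) :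
    List String → PySem.Dict String String → PySem.Dict String String
  | [], changes => changes
  | line :: rest, changes =>
    if PySem.Str.startswith line "```" then
      pvOuterI rest (changes.insert path (PySem.Str.join "\n" body))
    else
      pvInnerI path (body ++ [line]) rest changes
end

-- A's fold with the flag down is the outer scan, with the flag up the inner scan
theorem pvFold_eq_I (ls : List String) :
    (∀ d fp c, (ls.foldl pvStepA (d, fp, c, false)).1 = pvOuterI ls d) ∧
    (∀ d fp c, (ls.foldl pvStepA (d, fp, c, true)).1 = pvInnerI fp c ls d) := by
  induction ls with
  | nil => exact ⟨fun d fp c => rfl, fun d fp c => rfl⟩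
  | cons l rest ih =>
    refine ⟨fun d fp c => ?_, fun d fp c => ?_⟩ <;>
    · by_cases h : PySem.Chars.startswith l.toList ['`', '`', '`'] = true <;>
        simp [pvStepA, pvOuterI, pvInnerI, h, ih.1, ih.2]

-- fence indices of a suffix, with an explicit start offset
def pvFencesFrom (s : Int) (suf : List String) : List Int :=
  ((PySem.List.enumerate suf s).filter (fun p => PySem.Str.startswith p.2 "```")).map (fun p => p.1)

theorem pvFences_eq_from (lines : List String) : pvFences lines = pvFencesFrom 0 lines := rfl

theorem pvFencesFrom_cons (s : Int) (l : String) (suf : List String) :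
    pvFencesFrom s (l :: suf) =
      if PySem.Str.startswith l "```" then s :: pvFencesFrom (s + 1) suf
      else pvFencesFrom (s + 1) suf := by
  simp only [pvFencesFrom, PySem.List.enumerate_cons, List.filter_cons]
  split_ifs with h <;> simp_all

-- lines[o] at the opening fence
theorem pvGet_open (pre : List String) (fl : String) (rest : List String) :
    PySem.List.pyGetD (pre ++ fl :: rest) ((pre.length : Nat) : Int) "" = fl := by
  rw [PySem.List.pyGetD_natCast]
  simp [List.getD]

-- lines[o+1:c] is exactly the body between the fences
theorem pvSlice_body (pre : List String) (fl : String) (body rest : List String) :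
    PySem.List.slice (pre ++ fl :: (body ++ rest)) (some ((pre.length : Int) + 1))
      (some ((pre.length : Int) + 1 + (body.length : Int))) = body := by
  have h1 : ((pre.length : Int) + 1) = (((pre.length + 1 : Nat)) : Int) := by push_cast; ring
  have h2 : ((pre.length : Int) + 1 + (body.length : Int)) = (((pre.length + 1 + body.length : Nat)) : Int) := by push_cast; ring
  rw [h2, h1, PySem.List.slice_natCast]
  have hd : (pre ++ fl :: (body ++ rest)).drop (pre.length + 1) = body ++ rest := by
    rw [← List.drop_drop]
    simp
  have hn : pre.length + 1 + body.length - (pre.length + 1) = body.length := by omega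
  rw [hd, hn]
  exact List.take_left

-- the key correspondence: the scans equal B's pair loop over the fence indices
theorem pvScan_eq_pair (suf : List String) :
    (∀ (pre : List String) (d : PySem.Dict String String),
       pvOuterI suf d = pvPairLoop (pre ++ suf) (pvFencesFrom (pre.length : Int) suf) d) ∧
    (∀ (pre : List String) (fl : String) (body : List String) (d : PySem.Dict String String),
       pvInnerI (PySem.Str.strip (PySem.Str.slice fl (some 3) none)) body suf d
         = pvPairLoop (pre ++ fl :: (body ++ suf))
             ((pre.length : Int) :: pvFencesFrom ((pre.length : Int) + 1 + (body.length : Int)) suf) d) := by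
  induction suf with
  | nil =>
    constructor
    · intro pre d; simp [pvOuterI, pvFencesFrom, pvPairLoop]
    · intro pre fl body d; simp [pvInnerI, pvFencesFrom, pvPairLoop]
  | cons l suf ih =>
    constructor
    · intro pre d
      rw [pvFencesFrom_cons]
      by_cases h : PySem.Str.startswith l "```"
      · simp only [h, if_true, pvOuterI]
        have := ih.2 pre l [] d
        simpa [h] using this
      · simp only [h, pvOuterI]
        have := ih.1 (pre ++ [l]) d
        simpa [h, List.append_assoc] using this
    · intro pre fl body d
      rw [pvFencesFrom_cons]
      by_cases h : PySem.Str.startswith l "```"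
      · simp only [h, if_true, pvInnerI, pvPairLoop]
        rw [pvGet_open, pvSlice_body]
        have := ih.1 (pre ++ fl :: (body ++ [l])) (d.insert
          (PySem.Str.strip (PySem.Str.slice fl (some 3) none))
          (PySem.Str.join "\n" body))
        have e1 : (pre ++ fl :: (body ++ [l])) ++ suf = pre ++ fl :: (body ++ l :: suf) := by
          simp
        have e2 : (((pre ++ fl :: (body ++ [l])).length : Nat) : Int)
            = (pre.length : Int) + 1 + (body.length : Int) + 1 := by
          simp; ring
        rw [e1, e2] at this
        exact this
      · simp only [h, pvInnerI]
        have := ih.2 pre fl (body ++ [l]) d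
        have e1 : pre ++ fl :: ((body ++ [l]) ++ suf) = pre ++ fl :: (body ++ l :: suf) := by
          simp
        have e2 : (pre.length : Int) + 1 + (((body ++ [l]).length : Nat) : Int)
            = (pre.length : Int) + 1 + (body.length : Int) + 1 := by
          simp; ring
        rw [e1, e2] at this
        exact this

-- ===== VERDICT (by name: the statement is the Claim_ definition above) =====
theorem retrieve_file_changes_spec : Claim_equal_retrieve_file_changes := by
  intro answer _
  unfold Spec_retrieve_file_changes retrieve_file_changes retrieve_file_changes_alt
  show (((((PySem.Str.split? answer "\n").getD []).foldl pvStepA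
      (PySem.Dict.empty, "", [], false)).1).items)
    = (pvPairLoop ((PySem.Str.split? answer "\n").getD [])
        (pvFences ((PySem.Str.split? answer "\n").getD [])) PySem.Dict.empty).items
  rw [(pvFold_eq_I ((PySem.Str.split? answer "\n").getD [])).1, pvFences_eq_from]
  have := (pvScan_eq_pair ((PySem.Str.split? answer "\n").getD [])).1 [] PySem.Dict.empty
  simpa using congrArg PySem.Dict.items this
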